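-- pv_equiv track=rewrite | github.com/JENLISA4EVER/LLM_adaptive_dyg | LLM_adaptive_link_prediction.py | verify_and_create_sample_quadruples_optimized
-- ===== SOURCE A (Python) =====
-- from typing import List, Set, Dict, Tuple
-- from collections import defaultdict
--
-- def get_last_interaction_info_optimized(
--     node_id: int,
--     q_time: int,
--     node_history: defaultdict[int, list],
--     relations_map: Dict[int, str],
--     cache: Dict
-- ) -> Tuple[str, int, int]:
--     if node_id in cache:
--         return cache[node_id]
--     last_rel_id, last_ts = -1, -1
--     if node_id in node_history:
--         for partner_id, rel_id, timestamp in reversed(node_history[node_id]):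
--             if timestamp < q_time:
--                 last_rel_id = rel_id
--                 last_ts = timestamp
--                 break
--     if last_ts == -1:
--         cache[node_id] = ("<NO_HISTORY>", -1, -1)
--         return "<NO_HISTORY>", -1, -1
--     rel_text = relations_map.get(last_rel_id, f"Relation_{last_rel_id}")
--     cache[node_id] = (rel_text, last_ts, last_rel_id)
--     return rel_text, last_ts, last_rel_id
--
-- def verify_and_create_sample_quadruples_optimized(
--     u_id: int,
--     q_time: int,
--     future_positive_nodes: List[int],
--     ambiguous_nodes: List[int],
--     negative_nodes: List[int],
--     u_true_history_set: set,
--     node_history: defaultdict[int, list],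
--     relations_map: Dict[int, str]
-- ) -> Tuple[List[Tuple], List[Tuple], List[Tuple]]:
--     final_future_pos_samples, final_neg_samples, final_ambiguous_samples = [], [], []
--     interaction_cache = {}
--     for v_node in future_positive_nodes:
--         r_text, t, r_id = get_last_interaction_info_optimized(v_node, q_time, node_history, relations_map, interaction_cache)
--         if t != -1 and (r_id, v_node, t) not in u_true_history_set:
--             final_future_pos_samples.append((u_id, r_text, v_node, t))
--     for v_node in negative_nodes:
--         r_text, t, r_id = get_last_interaction_info_optimized(v_node, q_time, node_history, relations_map, interaction_cache)
--         if t != -1: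
--             final_neg_samples.append((u_id, r_text, v_node, t))
--     for v_node in ambiguous_nodes:
--         r_text, t, r_id = get_last_interaction_info_optimized(v_node, q_time, node_history, relations_map, interaction_cache)
--         if t != -1:
--             final_ambiguous_samples.append((u_id, r_text, v_node, t))
--     return final_future_pos_samples, final_neg_samples, final_ambiguous_samples
-- ===== SOURCE B (Python) =====
-- def verify_and_create_sample_quadruples_optimized(
--     u_id,
--     q_time,
--     future_positive_nodes,
--     ambiguous_nodes,
--     negative_nodes,
--     u_true_history_set,
--     node_history,
--     relations_map,
-- ):
--     # Forward scan keeping the last interaction strictly before q_time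
--     # ((-1, -1) when there is none), instead of a reversed scan with break.
--     def last_before(v):
--         best_r, best_t = -1, -1
--         for _, r, t in node_history.get(v, ()):
--             if t < q_time:
--                 best_r, best_t = r, t
--         return best_r, best_t
--
--     def samples(nodes, check_hist):
--         out = []
--         for v in nodes:
--             r, t = last_before(v)
--             if t != -1 and (not check_hist or (r, v, t) not in u_true_history_set):
--                 out.append((u_id, relations_map.get(r, f"Relation_{r}"), v, t))
--         return out
--
--     return (
--         samples(future_positive_nodes, True),
--         samples(negative_nodes, False),
--         samples(ambiguous_nodes, False),
--     )
-- ===== Notes on version B (the rewrite author's own statement) =====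
-- stated objective: simpler
-- what changed: Replaces the shared memoization cache and reversed early-break scans with a cache-free forward fold (keeping the last interaction before q_time) and one unified filtered pass used for all three node lists.
import Mathlib
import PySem

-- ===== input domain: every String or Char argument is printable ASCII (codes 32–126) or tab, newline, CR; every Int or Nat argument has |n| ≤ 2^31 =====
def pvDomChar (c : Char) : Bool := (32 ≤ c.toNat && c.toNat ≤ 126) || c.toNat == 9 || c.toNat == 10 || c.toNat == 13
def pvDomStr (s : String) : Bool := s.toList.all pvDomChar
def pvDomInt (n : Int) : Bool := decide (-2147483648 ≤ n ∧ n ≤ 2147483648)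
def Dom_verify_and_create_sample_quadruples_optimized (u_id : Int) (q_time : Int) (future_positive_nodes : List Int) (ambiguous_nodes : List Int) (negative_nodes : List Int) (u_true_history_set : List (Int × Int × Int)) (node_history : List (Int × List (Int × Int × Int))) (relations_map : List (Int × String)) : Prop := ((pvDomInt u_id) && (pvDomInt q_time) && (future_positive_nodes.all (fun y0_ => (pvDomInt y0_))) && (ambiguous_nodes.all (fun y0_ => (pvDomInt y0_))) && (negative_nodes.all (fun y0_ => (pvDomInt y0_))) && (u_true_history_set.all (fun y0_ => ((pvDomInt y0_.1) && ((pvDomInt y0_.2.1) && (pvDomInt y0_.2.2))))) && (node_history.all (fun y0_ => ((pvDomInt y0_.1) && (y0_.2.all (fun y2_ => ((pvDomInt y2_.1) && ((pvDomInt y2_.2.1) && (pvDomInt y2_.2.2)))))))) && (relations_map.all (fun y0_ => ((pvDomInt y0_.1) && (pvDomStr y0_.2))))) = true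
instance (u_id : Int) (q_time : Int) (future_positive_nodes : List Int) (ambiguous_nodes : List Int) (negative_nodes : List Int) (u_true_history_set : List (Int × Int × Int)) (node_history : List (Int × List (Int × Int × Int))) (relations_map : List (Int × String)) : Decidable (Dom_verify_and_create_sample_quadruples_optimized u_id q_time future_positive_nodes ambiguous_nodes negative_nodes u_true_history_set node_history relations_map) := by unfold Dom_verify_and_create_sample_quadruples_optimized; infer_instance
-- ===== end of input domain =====

-- B drops A's memoization cache and reversed early-break scan in favour of a cache-free
-- forward fold and one unified filtered pass (objective: simpler; same return value).

-- ===== PORT A =====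
-- `for partner_id, rel_id, timestamp in reversed(...): if timestamp < q_time: ...; break`
-- = first match of the reversed history list
def pvARevScan (q_time : Int) : List (Int × Int × Int) → Int × Int
  | [] => (-1, -1)
  | (_, rel_id, timestamp) :: rest =>
      if timestamp < q_time then (rel_id, timestamp) else pvARevScan q_time rest

def get_last_interaction_info_optimized (node_id : Int) (q_time : Int)
    (node_history : List (Int × List (Int × Int × Int))) (relations_map : List (Int × String))
    (cache : PySem.Dict Int (String × Int × Int)) :
    (String × Int × Int) × PySem.Dict Int (String × Int × Int) :=
  match cache.get? node_id with
  | some r => (r, cache)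
  | none =>
    let lp : Int × Int :=
      match (PySem.Dict.mk node_history).get? node_id with
      | some hist => pvARevScan q_time hist.reverse
      | none => (-1, -1)
    if lp.2 = -1 then
      (("<NO_HISTORY>", -1, -1), cache.insert node_id ("<NO_HISTORY>", -1, -1))
    else
      let rel_text := (PySem.Dict.mk relations_map).getD lp.1 ("Relation_" ++ PySem.Int.toStr lp.1)
      ((rel_text, lp.2, lp.1), cache.insert node_id (rel_text, lp.2, lp.1))

def verify_and_create_sample_quadruples_optimized (u_id : Int) (q_time : Int) (future_positive_nodes : List Int) (ambiguous_nodes : List Int) (negative_nodes : List Int) (u_true_history_set : List (Int × Int × Int)) (node_history : List (Int × List (Int × Int × Int))) (relations_map : List (Int × String)) : (List (Int × String × Int × Int)) × (List (Int × String × Int × Int)) × (List (Int × String × Int × Int)) :=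
  let s1 := future_positive_nodes.foldl
    (fun (st : List (Int × String × Int × Int) × PySem.Dict Int (String × Int × Int)) v_node =>
      let rc := get_last_interaction_info_optimized v_node q_time node_history relations_map st.2
      if rc.1.2.1 ≠ -1 ∧ ¬ ((rc.1.2.2, v_node, rc.1.2.1) ∈ u_true_history_set)
      then (st.1 ++ [(u_id, rc.1.1, v_node, rc.1.2.1)], rc.2) else (st.1, rc.2))
    ([], PySem.Dict.empty)
  let s2 := negative_nodes.foldl
    (fun (st : List (Int × String × Int × Int) × PySem.Dict Int (String × Int × Int)) v_node =>
      let rc := get_last_interaction_info_optimized v_node q_time node_history relations_map st.2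
      if rc.1.2.1 ≠ -1
      then (st.1 ++ [(u_id, rc.1.1, v_node, rc.1.2.1)], rc.2) else (st.1, rc.2))
    ([], s1.2)
  let s3 := ambiguous_nodes.foldl
    (fun (st : List (Int × String × Int × Int) × PySem.Dict Int (String × Int × Int)) v_node =>
      let rc := get_last_interaction_info_optimized v_node q_time node_history relations_map st.2
      if rc.1.2.1 ≠ -1
      then (st.1 ++ [(u_id, rc.1.1, v_node, rc.1.2.1)], rc.2) else (st.1, rc.2))
    ([], s2.2)
  (s1.1, s2.1, s3.1)

-- ===== PORT B =====
-- forward fold keeping the LAST interaction strictly before q_time ((-1,-1) if none)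
def pvBLastBefore (q_time : Int) (node_history : List (Int × List (Int × Int × Int))) (v : Int) : Int × Int :=
  (((PySem.Dict.mk node_history).get? v).getD []).foldl
    (fun best e => if e.2.2 < q_time then (e.2.1, e.2.2) else best) (-1, -1)

def pvBRelText (relations_map : List (Int × String)) (r : Int) : String :=
  (PySem.Dict.mk relations_map).getD r ("Relation_" ++ PySem.Int.toStr r)

def pvBSamples (u_id : Int) (q_time : Int) (u_true_history_set : List (Int × Int × Int))
    (node_history : List (Int × List (Int × Int × Int))) (relations_map : List (Int × String))
    (check_hist : Bool) (nodes : List Int) : List (Int × String × Int × Int) :=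
  nodes.foldl
    (fun out v =>
      let rt := pvBLastBefore q_time node_history v
      if rt.2 ≠ -1 ∧ (check_hist = false ∨ ¬ ((rt.1, v, rt.2) ∈ u_true_history_set))
      then out ++ [(u_id, pvBRelText relations_map rt.1, v, rt.2)] else out)
    []

def verify_and_create_sample_quadruples_optimized_alt (u_id : Int) (q_time : Int) (future_positive_nodes : List Int) (ambiguous_nodes : List Int) (negative_nodes : List Int) (u_true_history_set : List (Int × Int × Int)) (node_history : List (Int × List (Int × Int × Int))) (relations_map : List (Int × String)) : (List (Int × String × Int × Int)) × (List (Int × String × Int × Int)) × (List (Int × String × Int × Int)) :=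
  (pvBSamples u_id q_time u_true_history_set node_history relations_map true future_positive_nodes,
   pvBSamples u_id q_time u_true_history_set node_history relations_map false negative_nodes,
   pvBSamples u_id q_time u_true_history_set node_history relations_map false ambiguous_nodes)

-- ===== PRECONDITION & SPEC =====
def Spec_verify_and_create_sample_quadruples_optimized (u_id : Int) (q_time : Int) (future_positive_nodes : List Int) (ambiguous_nodes : List Int) (negative_nodes : List Int) (u_true_history_set : List (Int × Int × Int)) (node_history : List (Int × List (Int × Int × Int))) (relations_map : List (Int × String)) (out : (List (Int × String × Int × Int)) × (List (Int × String × Int × Int)) × (List (Int × String × Int × Int))) : Prop := out = verify_and_create_sample_quadruples_optimized_alt u_id q_time future_positive_nodes ambiguous_nodes negative_nodes u_true_history_set node_history relations_map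
instance (u_id : Int) (q_time : Int) (future_positive_nodes : List Int) (ambiguous_nodes : List Int) (negative_nodes : List Int) (u_true_history_set : List (Int × Int × Int)) (node_history : List (Int × List (Int × Int × Int))) (relations_map : List (Int × String)) (out : (List (Int × String × Int × Int)) × (List (Int × String × Int × Int)) × (List (Int × String × Int × Int))) : Decidable (Spec_verify_and_create_sample_quadruples_optimized u_id q_time future_positive_nodes ambiguous_nodes negative_nodes u_true_history_set node_history relations_map out) := by unfold Spec_verify_and_create_sample_quadruples_optimized; exact @instDecidableEqProd _ _ _ (@instDecidableEqProd _ _ _ _) out _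

-- ===== CLAIM (what is proved, stated in full; the proofs are below) =====
def Claim_equal_verify_and_create_sample_quadruples_optimized : Prop := ∀ (u_id : Int) (q_time : Int) (future_positive_nodes : List Int) (ambiguous_nodes : List Int) (negative_nodes : List Int) (u_true_history_set : List (Int × Int × Int)) (node_history : List (Int × List (Int × Int × Int))) (relations_map : List (Int × String)), Dom_verify_and_create_sample_quadruples_optimized u_id q_time future_positive_nodes ambiguous_nodes negative_nodes u_true_history_set node_history relations_map → Spec_verify_and_create_sample_quadruples_optimized u_id q_time future_positive_nodes ambiguous_nodes negative_nodes u_true_history_set node_history relations_map (verify_and_create_sample_quadruples_optimized u_id q_time future_positive_nodes ambiguous_nodes negative_nodes u_true_history_set node_history relations_map)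

-- ===== LEMMAS AND PROOFS =====


-- pvBSamples' fold appends; pulling the accumulator out front
theorem pvBSamples_shift (u_id q_time : Int) (uset : List (Int × Int × Int))
    (nh : List (Int × List (Int × Int × Int))) (rm : List (Int × String)) (check_hist : Bool)
    (nodes : List Int) :
    ∀ init : List (Int × String × Int × Int),
      nodes.foldl
        (fun out v =>
          let rt := pvBLastBefore q_time nh v
          if rt.2 ≠ -1 ∧ (check_hist = false ∨ ¬ ((rt.1, v, rt.2) ∈ uset))
          then out ++ [(u_id, pvBRelText rm rt.1, v, rt.2)] else out) init
      = init ++ pvBSamples u_id q_time uset nh rm check_hist nodes := by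
  induction nodes with
  | nil => intro init; simp [pvBSamples]
  | cons a nodes ih =>
      intro init
      simp only [pvBSamples, List.foldl_cons]
      conv_lhs => rw [ih]
      conv_rhs => rw [ih]
      split <;> simp


theorem pvBSamples_cons (u_id q_time : Int) (uset : List (Int × Int × Int))
    (nh : List (Int × List (Int × Int × Int))) (rm : List (Int × String)) (check_hist : Bool)
    (a : Int) (nodes : List Int) :
    pvBSamples u_id q_time uset nh rm check_hist (a :: nodes)
      = (let rt := pvBLastBefore q_time nh a
         if rt.2 ≠ -1 ∧ (check_hist = false ∨ ¬ ((rt.1, a, rt.2) ∈ uset))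
         then [(u_id, pvBRelText rm rt.1, a, rt.2)] else [])
        ++ pvBSamples u_id q_time uset nh rm check_hist nodes := by
  simp only [pvBSamples, List.foldl_cons]
  rw [pvBSamples_shift]
  split <;> simp [pvBSamples]

-- the value A computes (and caches) for a node, expressed through B's helpers
def pvInfo (q_time : Int) (node_history : List (Int × List (Int × Int × Int)))
    (relations_map : List (Int × String)) (v : Int) : String × Int × Int :=
  let p := pvBLastBefore q_time node_history v
  if p.2 = -1 then ("<NO_HISTORY>", -1, -1) else (pvBRelText relations_map p.1, p.2, p.1)

-- A's reversed early-break scan = B's forward fold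
theorem pvScan_eq_fold (q_time : Int) (l : List (Int × Int × Int)) :
    pvARevScan q_time l.reverse =
      l.foldl (fun best e => if e.2.2 < q_time then (e.2.1, e.2.2) else best) (-1, -1) := by
  induction l using List.reverseRecOn with
  | nil => rfl
  | append_singleton l a ih =>
      rcases a with ⟨p, r, t⟩
      simp only [List.reverse_append, List.reverse_cons, List.reverse_nil, List.nil_append,
        List.cons_append, List.foldl_append, List.foldl_cons, List.foldl_nil, pvARevScan]
      split <;> simp [ih]

def pvGood (q_time : Int) (node_history : List (Int × List (Int × Int × Int)))
    (relations_map : List (Int × String)) (c : PySem.Dict Int (String × Int × Int)) : Prop :=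
  ∀ k r, c.get? k = some r → r = pvInfo q_time node_history relations_map k

theorem pvGet_eq (v q_time : Int) (nh : List (Int × List (Int × Int × Int)))
    (rm : List (Int × String)) (c : PySem.Dict Int (String × Int × Int)) :
    get_last_interaction_info_optimized v q_time nh rm c
      = match c.get? v with
        | some r => (r, c)
        | none => (pvInfo q_time nh rm v, c.insert v (pvInfo q_time nh rm v)) := by
  cases h : c.get? v with
  | some r => simp [get_last_interaction_info_optimized, h]
  | none =>
      have hlp : (match (PySem.Dict.mk nh).get? v with
          | some hist => pvARevScan q_time hist.reverse
          | none => ((-1 : Int), (-1 : Int))) = pvBLastBefore q_time nh v := by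
        cases hh : (PySem.Dict.mk nh).get? v with
        | some hist => simp [pvBLastBefore, hh, pvScan_eq_fold]
        | none => simp [pvBLastBefore, hh]
      simp only [get_last_interaction_info_optimized, h, hlp]
      unfold pvInfo pvBRelText
      split <;> simp_all

theorem pvGet_fst (v q_time : Int) (nh : List (Int × List (Int × Int × Int)))
    (rm : List (Int × String)) (c : PySem.Dict Int (String × Int × Int))
    (hG : pvGood q_time nh rm c) :
    (get_last_interaction_info_optimized v q_time nh rm c).1 = pvInfo q_time nh rm v := by
  rw [pvGet_eq]
  cases h : c.get? v with
  | some r => simpa using hG v r h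
  | none => simp

theorem pvGet_good (v q_time : Int) (nh : List (Int × List (Int × Int × Int)))
    (rm : List (Int × String)) (c : PySem.Dict Int (String × Int × Int))
    (hG : pvGood q_time nh rm c) :
    pvGood q_time nh rm (get_last_interaction_info_optimized v q_time nh rm c).2 := by
  rw [pvGet_eq]
  cases h : c.get? v with
  | some r => simpa using hG
  | none =>
      simp only []
      intro k r hk
      by_cases hkv : k = v
      · subst hkv
        rw [PySem.Dict.get?_insert_self] at hk
        cases hk; rfl
      · rw [PySem.Dict.get?_insert_of_ne _ _ hkv] at hk
        exact hG k r hk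

-- the positives pass (membership filter active)
theorem pvLoop_pos (u_id q_time : Int) (uset : List (Int × Int × Int))
    (nh : List (Int × List (Int × Int × Int))) (rm : List (Int × String))
    (nodes : List Int) :
    ∀ (out : List (Int × String × Int × Int)) (c : PySem.Dict Int (String × Int × Int)),
      pvGood q_time nh rm c →
      (nodes.foldl
        (fun (st : List (Int × String × Int × Int) × PySem.Dict Int (String × Int × Int)) v_node =>
          let rc := get_last_interaction_info_optimized v_node q_time nh rm st.2
          if rc.1.2.1 ≠ -1 ∧ ¬ ((rc.1.2.2, v_node, rc.1.2.1) ∈ uset)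
          then (st.1 ++ [(u_id, rc.1.1, v_node, rc.1.2.1)], rc.2) else (st.1, rc.2)) (out, c)).1
        = out ++ pvBSamples u_id q_time uset nh rm true nodes ∧
      pvGood q_time nh rm
        (nodes.foldl
          (fun (st : List (Int × String × Int × Int) × PySem.Dict Int (String × Int × Int)) v_node =>
            let rc := get_last_interaction_info_optimized v_node q_time nh rm st.2
            if rc.1.2.1 ≠ -1 ∧ ¬ ((rc.1.2.2, v_node, rc.1.2.1) ∈ uset)
            then (st.1 ++ [(u_id, rc.1.1, v_node, rc.1.2.1)], rc.2) else (st.1, rc.2)) (out, c)).2 := by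
  induction nodes with
  | nil => intro out c hG; simpa [pvBSamples] using hG
  | cons a nodes ih =>
      intro out c hG
      have hfst := pvGet_fst a q_time nh rm c hG
      have hgood := pvGet_good a q_time nh rm c hG
      have hsc := pvBSamples_cons u_id q_time uset nh rm true a nodes
      simp only [List.foldl_cons]
      rw [hsc]
      -- reduce the head step using hfst
      have hinfo : pvInfo q_time nh rm a =
          (let p := pvBLastBefore q_time nh a
           if p.2 = -1 then ("<NO_HISTORY>", -1, -1) else (pvBRelText rm p.1, p.2, p.1)) := rfl
      by_cases ht : (pvBLastBefore q_time nh a).2 = -1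
      · have h1 : pvInfo q_time nh rm a = ("<NO_HISTORY>", -1, -1) := by
          rw [hinfo]; simp [ht]
        rw [hfst, h1]
        simpa [ht] using ih out _ hgood
      · have h1 : pvInfo q_time nh rm a =
            (pvBRelText rm (pvBLastBefore q_time nh a).1, (pvBLastBefore q_time nh a).2,
              (pvBLastBefore q_time nh a).1) := by
          rw [hinfo]; simp [ht]
        rw [hfst, h1]
        by_cases hm : ((pvBLastBefore q_time nh a).1, a, (pvBLastBefore q_time nh a).2) ∈ uset
        · simpa [ht, hm] using ih out _ hgood
        · simpa [ht, hm, List.append_assoc] using ih (out ++ _) _ hgood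

-- the plain pass (negatives and ambiguous: only the t ≠ -1 filter)
theorem pvLoop_plain (u_id q_time : Int) (uset : List (Int × Int × Int))
    (nh : List (Int × List (Int × Int × Int))) (rm : List (Int × String))
    (nodes : List Int) :
    ∀ (out : List (Int × String × Int × Int)) (c : PySem.Dict Int (String × Int × Int)),
      pvGood q_time nh rm c →
      (nodes.foldl
        (fun (st : List (Int × String × Int × Int) × PySem.Dict Int (String × Int × Int)) v_node =>
          let rc := get_last_interaction_info_optimized v_node q_time nh rm st.2
          if rc.1.2.1 ≠ -1
          then (st.1 ++ [(u_id, rc.1.1, v_node, rc.1.2.1)], rc.2) else (st.1, rc.2)) (out, c)).1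
        = out ++ pvBSamples u_id q_time uset nh rm false nodes ∧
      pvGood q_time nh rm
        (nodes.foldl
          (fun (st : List (Int × String × Int × Int) × PySem.Dict Int (String × Int × Int)) v_node =>
            let rc := get_last_interaction_info_optimized v_node q_time nh rm st.2
            if rc.1.2.1 ≠ -1
            then (st.1 ++ [(u_id, rc.1.1, v_node, rc.1.2.1)], rc.2) else (st.1, rc.2)) (out, c)).2 := by
  induction nodes with
  | nil => intro out c hG; simpa [pvBSamples] using hG
  | cons a nodes ih =>
      intro out c hG
      have hfst := pvGet_fst a q_time nh rm c hG
      have hgood := pvGet_good a q_time nh rm c hG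
      have hsc := pvBSamples_cons u_id q_time uset nh rm false a nodes
      simp only [List.foldl_cons]
      rw [hsc]
      have hinfo : pvInfo q_time nh rm a =
          (let p := pvBLastBefore q_time nh a
           if p.2 = -1 then ("<NO_HISTORY>", -1, -1) else (pvBRelText rm p.1, p.2, p.1)) := rfl
      by_cases ht : (pvBLastBefore q_time nh a).2 = -1
      · have h1 : pvInfo q_time nh rm a = ("<NO_HISTORY>", -1, -1) := by
          rw [hinfo]; simp [ht]
        rw [hfst, h1]
        simpa [ht] using ih out _ hgood
      · have h1 : pvInfo q_time nh rm a =
            (pvBRelText rm (pvBLastBefore q_time nh a).1, (pvBLastBefore q_time nh a).2,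
              (pvBLastBefore q_time nh a).1) := by
          rw [hinfo]; simp [ht]
        rw [hfst, h1]
        simpa [ht, List.append_assoc] using ih (out ++ _) _ hgood

-- ===== VERDICT (by name: the statement is the Claim_ definition above) =====
theorem verify_and_create_sample_quadruples_optimized_spec : Claim_equal_verify_and_create_sample_quadruples_optimized := by
  intro u_id q_time fp amb neg uset nh rm _
  unfold Spec_verify_and_create_sample_quadruples_optimized
  unfold verify_and_create_sample_quadruples_optimized
  unfold verify_and_create_sample_quadruples_optimized_alt
  have h0 : pvGood q_time nh rm PySem.Dict.empty := by
    intro k r hk; simp [PySem.Dict.get?_empty] at hk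
  obtain ⟨h1, g1⟩ := pvLoop_pos u_id q_time uset nh rm fp [] PySem.Dict.empty h0
  obtain ⟨h2, g2⟩ := pvLoop_plain u_id q_time uset nh rm neg [] _ g1
  obtain ⟨h3, _⟩ := pvLoop_plain u_id q_time uset nh rm amb [] _ g2
  simp only []
  exact Prod.ext (by simpa using h1) (Prod.ext (by simpa using h2) (by simpa using h3))
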